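-- pv_equiv track=rewrite | github.com/VasLem/custom-pytorch | custom_pytorch/custom_layers/bbox_layer.py | _get_bboxes
-- ===== SOURCE A (Python) =====
-- def _get_bboxes(ul_locs, ur_locs, bl_locs, br_locs):
--
--     ul_locs = sorted(ul_locs)
--     ur_locs = sorted(ur_locs)
--     bl_locs = sorted(bl_locs)
--     br_locs = sorted(br_locs)
--     ul_cnt = 0
--     boxes = []
--     bound_ur = []
--     bound_bl = []
--     bound_br = []
--     while ul_cnt < len(ul_locs):
--         ul_loc = ul_locs[ul_cnt]
--         br_cnt = 0
--         while br_cnt < len(br_locs):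
--             br_loc = br_locs[br_cnt]
--             if br_loc > ul_loc and br_loc not in bound_br:
--                 bound_br.append(br_loc)
--                 break
--             br_cnt += 1
--         else:
--             ul_cnt += 1
--             continue
--         bl_cnt = 0
--         while bl_cnt < len(bl_locs):
--             bl_loc = bl_locs[bl_cnt]
--             if bl_loc[1] > ul_loc[1] and bl_loc[0] < br_loc[0] and bl_loc not in bound_bl:
--                 bound_bl.append(bl_loc)
--                 break
--             bl_cnt += 1
--         else:
--             bound_br = bound_br[:-1]
--             ul_cnt += 1
--             continue
--         ur_cnt = 0
--         while ur_cnt < len(ur_locs):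
--             ur_loc = ur_locs[ur_cnt]
--             if ur_loc[0] > ul_loc[0] and ur_loc[1] < br_loc[1] and ur_loc not in bound_ur:
--                 bound_ur.append(ur_loc)
--                 break
--             ur_cnt += 1
--         else:
--             bound_br = bound_br[:-1]
--             bound_bl = bound_bl[:-1]
--             ul_cnt += 1
--             continue
--         boxes.append([ul_loc, ur_loc, br_loc, bl_loc])
--         ul_cnt += 1
--     return boxes
-- ===== SOURCE B (Python) =====
-- def _first_gt(pool, ul):
--     """Leftmost element of the (sorted) pool strictly greater than ul, by binary search."""
--     lo, hi = 0, len(pool)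
--     while lo < hi:
--         mid = (lo + hi) // 2
--         if pool[mid] > ul:
--             hi = mid
--         else:
--             lo = mid + 1
--     return pool[lo] if lo < len(pool) else None
--
--
-- def _get_bboxes(ul_locs, ur_locs, bl_locs, br_locs):
--     # Candidate pools shrink as corners get consumed; no bound/used lists are kept.
--     urs = sorted(ur_locs)
--     bls = sorted(bl_locs)
--     brs = sorted(br_locs)
--     boxes = []
--     for ul in sorted(ul_locs):
--         br = _first_gt(brs, ul)
--         if br is None:
--             continue
--         bl = next((p for p in bls if p[1] > ul[1] and p[0] < br[0]), None)
--         if bl is None: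
--             continue
--         ur = next((p for p in urs if p[0] > ul[0] and p[1] < br[1]), None)
--         if ur is None:
--             continue
--         brs = [p for p in brs if p != br]
--         bls = [p for p in bls if p != bl]
--         urs = [p for p in urs if p != ur]
--         boxes.append([ul, ur, br, bl])
--     return boxes
-- ===== Notes on version B (the rewrite author's own statement) =====
-- stated objective: faster
-- what changed: B keeps no bound/used lists at all: matched corners are filtered out of shrinking candidate pools (the complement state), and the br corner is located by binary search on the lexicographically sorted pool instead of A's linear while-scans with per-element 'not in bound' membership tests and append-then-rollback slicing.
import Mathlib
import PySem

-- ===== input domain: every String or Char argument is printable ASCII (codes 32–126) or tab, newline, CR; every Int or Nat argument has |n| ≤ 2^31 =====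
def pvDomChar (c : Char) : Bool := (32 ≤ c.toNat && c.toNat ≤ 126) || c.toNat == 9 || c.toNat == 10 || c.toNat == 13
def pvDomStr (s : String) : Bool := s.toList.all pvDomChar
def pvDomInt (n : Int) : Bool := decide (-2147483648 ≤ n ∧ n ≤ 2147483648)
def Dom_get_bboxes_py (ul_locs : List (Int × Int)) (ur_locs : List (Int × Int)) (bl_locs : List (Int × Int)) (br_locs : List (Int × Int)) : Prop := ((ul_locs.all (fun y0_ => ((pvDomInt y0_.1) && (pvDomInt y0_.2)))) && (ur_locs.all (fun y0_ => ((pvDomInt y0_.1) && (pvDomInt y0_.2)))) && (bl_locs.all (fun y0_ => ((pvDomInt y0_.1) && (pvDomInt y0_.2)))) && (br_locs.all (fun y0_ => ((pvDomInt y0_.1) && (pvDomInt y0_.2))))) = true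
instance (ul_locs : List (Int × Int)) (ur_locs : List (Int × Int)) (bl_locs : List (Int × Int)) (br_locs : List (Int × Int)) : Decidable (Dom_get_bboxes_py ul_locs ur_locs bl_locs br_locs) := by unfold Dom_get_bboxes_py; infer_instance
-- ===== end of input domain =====

-- B drops A's bound/used lists entirely: it keeps shrinking candidate pools (matched corners are
-- filtered out) and finds the br corner by binary search on the sorted pool (objective: alternative);
-- the return values are proved equal on all inputs.

-- ===== PORT A =====

-- Python tuple comparison 'p > q' on pairs of ints (lexicographic), exact
def pvTupGt (p q : Int × Int) : Bool := p.1 > q.1 || (p.1 == q.1 && p.2 > q.2)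

-- A's inner 'while cnt < len(xs): x = xs[cnt]; if pred(x): break; cnt += 1 / else:'
-- = first element of xs (scanned in index order) satisfying pred, none if the loop exhausts
def pvScanA (p : Int × Int → Bool) : List (Int × Int) → Option (Int × Int)
  | [] => none
  | x :: xs => if p x then some x else pvScanA p xs

-- A's outer while over ul_locs; state = (bound_ur, bound_bl, bound_br, boxes);
-- 'bound_xx[:-1]' rollback = dropLast, exact on a just-appended list
def pvLoopA (brs bls urs : List (Int × Int)) :
    List (Int × Int) → List (Int × Int) → List (Int × Int) → List (Int × Int) →
    List (List (Int × Int)) → List (List (Int × Int))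
  | [], _, _, _, boxes => boxes
  | ul :: rest, bUr, bBl, bBr, boxes =>
    match pvScanA (fun br => pvTupGt br ul && !bBr.contains br) brs with
    | none => pvLoopA brs bls urs rest bUr bBl bBr boxes
    | some br =>
      let bBr' := bBr ++ [br]
      match pvScanA (fun bl => decide (bl.2 > ul.2) && decide (bl.1 < br.1) && !bBl.contains bl) bls with
      | none => pvLoopA brs bls urs rest bUr bBl bBr'.dropLast boxes
      | some bl =>
        let bBl' := bBl ++ [bl]
        match pvScanA (fun ur => decide (ur.1 > ul.1) && decide (ur.2 < br.2) && !bUr.contains ur) urs with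
        | none => pvLoopA brs bls urs rest bUr bBl'.dropLast bBr'.dropLast boxes
        | some ur =>
          pvLoopA brs bls urs rest (bUr ++ [ur]) bBl' bBr' (boxes ++ [[ul, ur, br, bl]])

def get_bboxes_py (ul_locs : List (Int × Int)) (ur_locs : List (Int × Int)) (bl_locs : List (Int × Int)) (br_locs : List (Int × Int)) : List (List (Int × Int)) :=
  pvLoopA (PySem.List.sorted2 br_locs Prod.fst Prod.snd false)
          (PySem.List.sorted2 bl_locs Prod.fst Prod.snd false)
          (PySem.List.sorted2 ur_locs Prod.fst Prod.snd false)
          (PySem.List.sorted2 ul_locs Prod.fst Prod.snd false)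
          [] [] [] []

-- ===== PORT B =====

-- Source B's _first_gt while-loop: 'while lo < hi: mid = (lo+hi)//2; …'; lo, hi are Nats with
-- lo ≤ hi ≤ len(pool) throughout, so Nat '/ 2' is Python's '//' and pool[mid] is in range
-- (getD's default is never read in a call of pvFirstGt).
def pvBSLoop (pool : List (Int × Int)) (ul : Int × Int) (lo hi : Nat) : Nat :=
  if lo < hi then
    let mid := (lo + hi) / 2
    if pvTupGt (pool.getD mid (0, 0)) ul then pvBSLoop pool ul lo mid
    else pvBSLoop pool ul (mid + 1) hi
  else lo
termination_by hi - lo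
decreasing_by all_goals omega

-- Source B's _first_gt: 'return pool[lo] if lo < len(pool) else None'
def pvFirstGt (pool : List (Int × Int)) (ul : Int × Int) : Option (Int × Int) :=
  let lo := pvBSLoop pool ul 0 pool.length
  if lo < pool.length then some (pool.getD lo (0, 0)) else none

def get_bboxes_py_alt (ul_locs : List (Int × Int)) (ur_locs : List (Int × Int)) (bl_locs : List (Int × Int)) (br_locs : List (Int × Int)) : List (List (Int × Int)) :=
  ((PySem.List.sorted2 ul_locs Prod.fst Prod.snd false).foldl
    (fun st ul =>
      match pvFirstGt st.2.2.2 ul with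
      | none => st
      | some br =>
        match st.2.2.1.find? (fun p => decide (p.2 > ul.2) && decide (p.1 < br.1)) with
        | none => st
        | some bl =>
          match st.2.1.find? (fun p => decide (p.1 > ul.1) && decide (p.2 < br.2)) with
          | none => st
          | some ur =>
            (st.1 ++ [[ul, ur, br, bl]],
             st.2.1.filter (fun p => !(p == ur)),
             st.2.2.1.filter (fun p => !(p == bl)),
             st.2.2.2.filter (fun p => !(p == br))))
    ([],
     PySem.List.sorted2 ur_locs Prod.fst Prod.snd false,
     PySem.List.sorted2 bl_locs Prod.fst Prod.snd false,
     PySem.List.sorted2 br_locs Prod.fst Prod.snd false)).1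

-- ===== PRECONDITION & SPEC =====
def Spec_get_bboxes_py (ul_locs : List (Int × Int)) (ur_locs : List (Int × Int)) (bl_locs : List (Int × Int)) (br_locs : List (Int × Int)) (out : List (List (Int × Int))) : Prop := out = get_bboxes_py_alt ul_locs ur_locs bl_locs br_locs
instance (ul_locs : List (Int × Int)) (ur_locs : List (Int × Int)) (bl_locs : List (Int × Int)) (br_locs : List (Int × Int)) (out : List (List (Int × Int))) : Decidable (Spec_get_bboxes_py ul_locs ur_locs bl_locs br_locs out) := by unfold Spec_get_bboxes_py; infer_instance

-- ===== CLAIM (what is proved, stated in full; the proofs are below) =====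
def Claim_equal_get_bboxes_py : Prop := ∀ (ul_locs : List (Int × Int)) (ur_locs : List (Int × Int)) (bl_locs : List (Int × Int)) (br_locs : List (Int × Int)), Dom_get_bboxes_py ul_locs ur_locs bl_locs br_locs → Spec_get_bboxes_py ul_locs ur_locs bl_locs br_locs (get_bboxes_py ul_locs ur_locs bl_locs br_locs)

-- ===== LEMMAS AND PROOFS =====

-- Python's lexicographic ≤ on int pairs, as a Prop
def pvLexLe (a b : Int × Int) : Prop := a.1 < b.1 ∨ (a.1 = b.1 ∧ a.2 ≤ b.2)

-- A's index-order scan is List.find?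
theorem pvScanA_eq_find? (p : Int × Int → Bool) (xs : List (Int × Int)) :
    pvScanA p xs = xs.find? p := by
  induction xs with
  | nil => rfl
  | cons x xs ih => simp [pvScanA, List.find?, ih]; split <;> simp_all

-- sorted2 by (fst, snd) is pairwise lexicographically ≤
theorem pairwise_insertBy_lex (x : Int × Int) (l : List (Int × Int))
    (hl : l.Pairwise pvLexLe) :
    (PySem.List.insertBy
      (fun a b => decide (a.1 < b.1) || !decide (b.1 < a.1) && decide (a.2 < b.2)) x l).Pairwise pvLexLe := by
  induction l with
  | nil => simp [PySem.List.insertBy]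
  | cons y ys ih =>
    rw [List.pairwise_cons] at hl
    simp only [PySem.List.insertBy]
    split
    · rename_i hbef
      refine List.Pairwise.cons ?_ (List.Pairwise.cons hl.1 hl.2)
      intro z hz
      rw [List.mem_cons] at hz
      have hxy : pvLexLe x y := by
        simp only [Bool.or_eq_true, Bool.and_eq_true, Bool.not_eq_true', decide_eq_true_eq,
          decide_eq_false_iff_not] at hbef
        unfold pvLexLe; omega
      rcases hz with hz | hz
      · subst hz; exact hxy
      · have := hl.1 z hz
        unfold pvLexLe at *; omega
    · rename_i hbef
      refine List.Pairwise.cons ?_ (ih hl.2)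
      intro z hz
      rw [PySem.List.mem_insertBy] at hz
      rcases hz with hz | hz
      · subst hz
        simp only [Bool.or_eq_true, Bool.and_eq_true, Bool.not_eq_true', decide_eq_true_eq,
          decide_eq_false_iff_not] at hbef
        unfold pvLexLe; omega
      · exact hl.1 z hz

theorem sorted2_pairwise_lex (xs : List (Int × Int)) :
    (PySem.List.sorted2 xs Prod.fst Prod.snd false).Pairwise pvLexLe := by
  show ((List.foldl (fun acc x => PySem.List.insertBy _ x acc) [] xs).Pairwise pvLexLe)
  have : ∀ (l : List (Int × Int)) (acc : List (Int × Int)), acc.Pairwise pvLexLe →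
      (List.foldl (fun acc x => PySem.List.insertBy
        (fun a b => decide (a.1 < b.1) || !decide (b.1 < a.1) && decide (a.2 < b.2)) x acc) acc l).Pairwise pvLexLe := by
    intro l
    induction l with
    | nil => intro acc h; exact h
    | cons x t ih => intro acc h; exact ih _ (pairwise_insertBy_lex x acc h)
  exact this xs [] List.Pairwise.nil

-- pred (· > ul) is monotone along a lexicographically sorted pool
theorem pvTupGt_mono (ul a b : Int × Int) (hab : pvLexLe a b) (ha : pvTupGt a ul = true) :
    pvTupGt b ul = true := by
  simp only [pvTupGt, Bool.or_eq_true, Bool.and_eq_true, decide_eq_true_eq, beq_iff_eq] at *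
  unfold pvLexLe at hab; omega

-- the binary-search loop, on a pool whose pred-region is an upward-closed suffix, lands on its border
theorem pvBSLoop_spec (pool : List (Int × Int)) (ul : Int × Int)
    (hmono : ∀ i j : Nat, i ≤ j → j < pool.length →
      pvTupGt (pool.getD i (0, 0)) ul = true → pvTupGt (pool.getD j (0, 0)) ul = true) :
    ∀ n lo hi, hi - lo = n → hi ≤ pool.length → lo ≤ hi →
    (∀ i : Nat, i < lo → pvTupGt (pool.getD i (0, 0)) ul = false) →
    (∀ i : Nat, hi ≤ i → i < pool.length → pvTupGt (pool.getD i (0, 0)) ul = true) →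
    lo ≤ pvBSLoop pool ul lo hi ∧ pvBSLoop pool ul lo hi ≤ hi ∧
    (∀ i : Nat, i < pvBSLoop pool ul lo hi → pvTupGt (pool.getD i (0, 0)) ul = false) ∧
    (∀ i : Nat, pvBSLoop pool ul lo hi ≤ i → i < pool.length →
      pvTupGt (pool.getD i (0, 0)) ul = true) := by
  intro n
  induction n using Nat.strong_induction_on with
  | _ n ih =>
    intro lo hi hn hhi hlohi hlow hhigh
    rw [pvBSLoop]
    by_cases h : lo < hi
    · simp only [if_pos h]
      set mid := (lo + hi) / 2 with hmid
      have hmlt : mid < hi := by omega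
      have hmge : lo ≤ mid := by omega
      by_cases hp : pvTupGt (pool.getD mid (0, 0)) ul = true
      · rw [if_pos hp]
        have hhigh' : ∀ i : Nat, mid ≤ i → i < pool.length →
            pvTupGt (pool.getD i (0, 0)) ul = true := fun i hi' hil =>
          hmono mid i hi' hil hp
        have := ih (mid - lo) (by omega) lo mid rfl (by omega) hmge hlow hhigh'
        exact ⟨this.1, by omega, this.2.2⟩
      · rw [if_neg hp]
        have hlow' : ∀ i : Nat, i < mid + 1 → pvTupGt (pool.getD i (0, 0)) ul = false := by
          intro i hi'
          by_cases hil : i < lo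
          · exact hlow i hil
          · rcases Bool.eq_false_or_eq_true (pvTupGt (pool.getD i (0, 0)) ul) with ht | hf
            · exact absurd (hmono i mid (by omega) (by omega) ht) hp
            · exact hf
        have := ih (hi - (mid + 1)) (by omega) (mid + 1) hi rfl hhi (by omega) hlow' hhigh
        exact ⟨by omega, this.2.1, this.2.2⟩
    · simp only [if_neg h]
      exact ⟨le_refl _, hlohi, hlow, fun i hi' hil => hhigh i (by omega) hil⟩

-- find? of a monotone pred on a list with false-prefix/true-suffix border r
theorem find?_eq_of_border (l : List (Int × Int)) (p : Int × Int → Bool) (r : Nat)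
    (hlow : ∀ i : Nat, i < r → p (l.getD i (0, 0)) = false)
    (hhigh : ∀ i : Nat, r ≤ i → i < l.length → p (l.getD i (0, 0)) = true) :
    l.find? p = if r < l.length then some (l.getD r (0, 0)) else none := by
  induction l generalizing r with
  | nil => simp
  | cons x t ih =>
    cases r with
    | zero =>
      have hx : p x = true := hhigh 0 (le_refl _) (by simp)
      simp [List.find?, hx]
    | succ r' =>
      have hx : p x = false := hlow 0 (by omega)
      simp only [List.find?, hx]
      have := ih r' (fun i hi => hlow (i + 1) (by omega))
        (fun i hi hil => hhigh (i + 1) (by omega) (by simpa using Nat.succ_lt_succ hil))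
      rw [this]
      by_cases h : r' < t.length
      · rw [if_pos h, if_pos (by simpa using Nat.succ_lt_succ h)]
        simp
      · rw [if_neg h, if_neg (by simp; omega)]

-- on a lexicographically sorted pool, Source B's binary search = the linear first-match scan
theorem pvFirstGt_eq_find? (pool : List (Int × Int)) (ul : Int × Int)
    (hsorted : pool.Pairwise pvLexLe) :
    pvFirstGt pool ul = pool.find? (fun p => pvTupGt p ul) := by
  have hpw := (List.pairwise_iff_getElem).1 hsorted
  have hmono : ∀ i j : Nat, i ≤ j → j < pool.length →
      pvTupGt (pool.getD i (0, 0)) ul = true → pvTupGt (pool.getD j (0, 0)) ul = true := by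
    intro i j hij hj hp
    rcases Nat.eq_or_lt_of_le hij with rfl | hlt
    · exact hp
    · have hi : i < pool.length := by omega
      have hle := hpw i j hi hj hlt
      rw [List.getD_eq_getElem _ _ hi] at hp
      rw [List.getD_eq_getElem _ _ hj]
      exact pvTupGt_mono ul _ _ hle hp
  have hspec := pvBSLoop_spec pool ul hmono (pool.length - 0) 0 pool.length rfl
    (le_refl _) (by omega) (fun i hi => absurd hi (by omega))
    (fun i hi hil => absurd hil (by omega))
  unfold pvFirstGt
  have := find?_eq_of_border pool (fun p => pvTupGt p ul) (pvBSLoop pool ul 0 pool.length)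
    (fun i hi => by simpa using hspec.2.2.1 i hi)
    (fun i hi hil => by simpa using hspec.2.2.2 i hi hil)
  rw [this]

-- first match among the unconsumed = first match with a used-list membership test
theorem find?_filter_not_contains (l used : List (Int × Int)) (p : Int × Int → Bool) :
    (l.filter (fun x => !used.contains x)).find? p
      = l.find? (fun x => p x && !used.contains x) := by
  induction l with
  | nil => rfl
  | cons x t ih =>
    by_cases hc : x ∈ used
    · simp [hc]
      simpa using ih
    · by_cases hp : p x = true
      · simp [hc, hp]
      · simp [hc, hp]
        simpa using ih

-- consuming a matched corner from the pool = appending it to the used list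
theorem filter_neq_filter_not_contains (l used : List (Int × Int)) (v : Int × Int) :
    (l.filter (fun x => !used.contains x)).filter (fun p => !(p == v))
      = l.filter (fun x => !(used ++ [v]).contains x) := by
  rw [List.filter_filter]
  apply List.filter_congr
  intro x _
  by_cases hv : x = v <;> by_cases hu : x ∈ used <;> simp [hv, hu]

-- the two loops agree for every pair of states related by pool = sorted \ used
theorem pvLoopA_eq_foldl (brsS blsS ursS : List (Int × Int))
    (hbrS : brsS.Pairwise pvLexLe)
    (uls : List (Int × Int)) (bUr bBl bBr : List (Int × Int)) (boxes : List (List (Int × Int))) :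
    pvLoopA brsS blsS ursS uls bUr bBl bBr boxes =
      (uls.foldl
        (fun st ul =>
          match pvFirstGt st.2.2.2 ul with
          | none => st
          | some br =>
            match st.2.2.1.find? (fun p => decide (p.2 > ul.2) && decide (p.1 < br.1)) with
            | none => st
            | some bl =>
              match st.2.1.find? (fun p => decide (p.1 > ul.1) && decide (p.2 < br.2)) with
              | none => st
              | some ur =>
                (st.1 ++ [[ul, ur, br, bl]],
                 st.2.1.filter (fun p => !(p == ur)),
                 st.2.2.1.filter (fun p => !(p == bl)),
                 st.2.2.2.filter (fun p => !(p == br))))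
        (boxes,
         ursS.filter (fun x => !bUr.contains x),
         blsS.filter (fun x => !bBl.contains x),
         brsS.filter (fun x => !bBr.contains x))).1 := by
  induction uls generalizing bUr bBl bBr boxes with
  | nil => rfl
  | cons ul rest ih =>
    simp only [pvLoopA, List.foldl_cons, pvScanA_eq_find?]
    have hpoolbr : (brsS.filter (fun x => !bBr.contains x)).Pairwise pvLexLe :=
      List.Pairwise.sublist List.filter_sublist hbrS
    rw [pvFirstGt_eq_find? _ ul hpoolbr, find?_filter_not_contains]
    cases hbr : brsS.find? (fun br => pvTupGt br ul && !bBr.contains br) with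
    | none => exact ih bUr bBl bBr boxes
    | some br =>
      simp only [List.dropLast_concat]
      rw [find?_filter_not_contains]
      cases hbl : blsS.find? (fun bl => decide (bl.2 > ul.2) && decide (bl.1 < br.1) && !bBl.contains bl) with
      | none => exact ih bUr bBl bBr boxes
      | some bl =>
        rw [find?_filter_not_contains]
        cases hur : ursS.find? (fun ur => decide (ur.1 > ul.1) && decide (ur.2 < br.2) && !bUr.contains ur) with
        | none => exact ih bUr bBl bBr boxes
        | some ur =>
          simp only [filter_neq_filter_not_contains]
          exact ih (bUr ++ [ur]) (bBl ++ [bl]) (bBr ++ [br]) (boxes ++ [[ul, ur, br, bl]])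

-- ===== VERDICT (by name: the statement is the Claim_ definition above) =====
theorem get_bboxes_py_spec : Claim_equal_get_bboxes_py := by
  intro ul_locs ur_locs bl_locs br_locs _
  unfold Spec_get_bboxes_py get_bboxes_py get_bboxes_py_alt
  simpa using pvLoopA_eq_foldl _ _ _ (sorted2_pairwise_lex br_locs) _ [] [] [] []
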